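-- pv_equiv track=rewrite | github.com/duoyw/Eraser | Spark/auncel/utils.py | get_training_pair
-- ===== SOURCE A (Python) =====
-- def get_training_pair(candidates):
--     assert len(candidates) >= 2
--     X1, X2 = [], []
--
--     i = 0
--     while i < len(candidates) - 1:
--         s1 = candidates[i]
--         j = i + 1
--         while j < len(candidates):
--             s2 = candidates[j]
--             X1.append(s1)
--             X2.append(s2)
--             j += 1
--         i += 1
--     return X1, X2
-- ===== SOURCE B (Python) =====
-- def get_training_pair(candidates):
--     assert len(candidates) >= 2
--     r1, r2, rs = [], [], []
--     for x in reversed(candidates):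
--         r1.extend([x] * len(rs))
--         r2.extend(rs)
--         rs.append(x)
--     return r1[::-1], r2[::-1]
-- ===== Notes on version B (the rewrite author's own statement) =====
-- stated objective: alternative
-- what changed: A enumerates all i<j index pairs with two nested while loops over indices; B makes a single reversed pass over the elements, growing the suffix incrementally as an accumulator, building both output columns back-to-front and reversing them once at the end, with no index arithmetic, no inner element loop and no slicing of the input.
import Mathlib
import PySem

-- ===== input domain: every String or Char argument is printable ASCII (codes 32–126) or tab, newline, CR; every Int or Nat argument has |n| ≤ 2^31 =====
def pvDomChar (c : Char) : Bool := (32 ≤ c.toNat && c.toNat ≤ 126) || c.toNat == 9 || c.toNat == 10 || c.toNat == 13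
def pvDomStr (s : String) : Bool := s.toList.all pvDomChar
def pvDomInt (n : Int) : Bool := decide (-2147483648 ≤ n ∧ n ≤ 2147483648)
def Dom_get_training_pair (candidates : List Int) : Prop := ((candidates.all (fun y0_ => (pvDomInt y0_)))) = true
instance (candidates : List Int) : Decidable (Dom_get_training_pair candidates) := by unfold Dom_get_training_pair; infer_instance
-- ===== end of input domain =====

-- B replaces A's nested index while loops with one reversed pass over the elements
-- that grows the suffix incrementally, builds both outputs back-to-front, and
-- reverses them once at the end (objective: alternative decomposition, same cost).

-- ===== PORT A =====
-- inner 'while j < len(candidates):' loop of A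
def pvAInner (cs : List Int) (s1 : Int) (j : Nat) (X1 X2 : List Int) :
    List Int × List Int :=
  if h : j < cs.length then
    pvAInner cs s1 (j + 1) (X1 ++ [s1]) (X2 ++ [cs[j]])
  else (X1, X2)
termination_by cs.length - j

-- outer 'while i < len(candidates) - 1:' loop of A
def pvAOuter (cs : List Int) (i : Nat) (X1 X2 : List Int) : List Int × List Int :=
  if h : i < cs.length - 1 then
    let s1 := cs[i]'(by omega)
    let p := pvAInner cs s1 (i + 1) X1 X2
    pvAOuter cs (i + 1) p.1 p.2
  else (X1, X2)
termination_by cs.length - 1 - i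

def get_training_pair (candidates : List Int) : List Int × List Int :=
  pvAOuter candidates 0 [] []

-- ===== PORT B =====
-- 'for x in reversed(candidates):' single pass; state (r1, r2, rs): extend r1
-- with [x]*len(rs), r2 with rs, append x to rs; finally reverse r1 and r2
-- ('[::-1]' ported as List.reverse). foldr processes the last element first,
-- exactly like Python's reversed().
def get_training_pair_alt (candidates : List Int) : List Int × List Int :=
  let r := candidates.foldr
    (fun x (st : List Int × List Int × List Int) =>
      (st.1 ++ List.replicate st.2.2.length x, st.2.1 ++ st.2.2, st.2.2 ++ [x]))
    ([], [], [])
  (r.1.reverse, r.2.1.reverse)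

-- ===== PRECONDITION & SPEC =====
-- A's 'assert len(candidates) >= 2' raises AssertionError on shorter lists.
def Pre_get_training_pair (candidates : List Int) : Prop := 2 ≤ candidates.length
instance (candidates : List Int) : Decidable (Pre_get_training_pair candidates) := by
  unfold Pre_get_training_pair; infer_instance

def pvWitness_get_training_pair : List Int := [1, 2]

def Spec_get_training_pair (candidates : List Int) (out : List Int × List Int) : Prop :=
  out = get_training_pair_alt candidates
instance (candidates : List Int) (out : List Int × List Int) :
    Decidable (Spec_get_training_pair candidates out) := by
  unfold Spec_get_training_pair; infer_instance

-- ===== CLAIM (what is proved, stated in full; the proofs are below) =====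
def Claim_equal_get_training_pair : Prop :=
  ∀ (candidates : List Int), Dom_get_training_pair candidates →
    Pre_get_training_pair candidates →
    Spec_get_training_pair candidates (get_training_pair candidates)

-- ===== LEMMAS AND PROOFS =====

-- closed-form first column: pf (x :: rest) = rest.length copies of x, then pf rest
def pvPF : List Int → List Int
  | [] => []
  | x :: rest => List.replicate rest.length x ++ pvPF rest

-- closed-form second column: pg (x :: rest) = rest, then pg rest
def pvPG : List Int → List Int
  | [] => []
  | _ :: rest => rest ++ pvPG rest

-- A's inner loop appends a constant column and the suffix of cs from j.
theorem pvAInner_eq_aux (cs : List Int) (s1 : Int) :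
    ∀ (n j : Nat) (X1 X2 : List Int), cs.length - j = n →
      pvAInner cs s1 j X1 X2 =
        (X1 ++ List.replicate n s1, X2 ++ cs.drop j) := by
  intro n
  induction n with
  | zero =>
    intro j X1 X2 h
    rw [pvAInner, dif_neg (by omega)]
    simp [List.drop_eq_nil_of_le (by omega : cs.length ≤ j)]
  | succ n ihn =>
    intro j X1 X2 h
    have hj : j < cs.length := by omega
    rw [pvAInner, dif_pos hj, ihn (j + 1) _ _ (by omega),
      List.drop_eq_getElem_cons hj]
    simp [List.replicate_succ]

-- A's outer loop from index i appends the closed forms of the suffix cs.drop i.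
theorem pvAOuter_eq (cs : List Int) :
    ∀ (i : Nat) (X1 X2 : List Int),
      pvAOuter cs i X1 X2 = (X1 ++ pvPF (cs.drop i), X2 ++ pvPG (cs.drop i)) := by
  intro i
  induction hk : cs.length - 1 - i using Nat.strong_induction_on generalizing i with
  | _ k ih
  intro X1 X2
  rw [pvAOuter]
  split
  · next h =>
    have hi : i < cs.length := by omega
    dsimp only
    rw [pvAInner_eq_aux cs _ (cs.length - (i + 1)) (i + 1) X1 X2 rfl,
      ih (cs.length - 1 - (i + 1)) (by omega) (i + 1) rfl,
      List.drop_eq_getElem_cons hi]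
    simp [pvPF, pvPG, List.append_assoc]
  · next h =>
    -- i ≥ len - 1: cs.drop i is [] or a singleton, so both closed forms are [].
    have : cs.drop i = [] ∨ ∃ a, cs.drop i = [a] := by
      have hlen : (cs.drop i).length ≤ 1 := by simp; omega
      match hd : cs.drop i with
      | [] => exact Or.inl rfl
      | [a] => exact Or.inr ⟨a, rfl⟩
      | a :: b :: t => rw [hd] at hlen; simp at hlen
    rcases this with hd | ⟨a, hd⟩ <;> simp [hd, pvPF, pvPG]

-- B's fold computes the reversed closed forms together with the reversed suffix.
theorem pvB_eq (cs : List Int) :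
    cs.foldr
      (fun x (st : List Int × List Int × List Int) =>
        (st.1 ++ List.replicate st.2.2.length x, st.2.1 ++ st.2.2, st.2.2 ++ [x]))
      ([], [], []) = ((pvPF cs).reverse, (pvPG cs).reverse, cs.reverse) := by
  induction cs with
  | nil => rfl
  | cons x rest ih => simp [List.foldr_cons, ih, pvPF, pvPG]

-- ===== VERDICT (by name: the statement is the Claim_ definition above) =====
theorem get_training_pair_spec : Claim_equal_get_training_pair := by
  intro cs _ _
  unfold Spec_get_training_pair get_training_pair get_training_pair_alt
  rw [pvB_eq, pvAOuter_eq]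
  simp
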